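-- pv_equiv track=rewrite | github.com/Bazabizi/A2SV_Programming | contest/(F) Power Products.py | simplified
-- ===== SOURCE A (Python) =====
-- from collections import defaultdict
-- import math
--
-- def simplified(num , k):
--     temp = defaultdict(int)
--     n = 2
--     ans = [1]
--     total = [1]
--     while n*n <= num:
--         while num %n ==0 :
--             temp[n] += 1
--             num //= n
--         n += 1
--     if num > 1:
--         temp[num] += 1
--     for key,value in temp.items():
--         if value % k==0:
--             ans.append(1)
--             total.append(1)
--         else:
--             ans.append(key**(k - (value%k)))
--             total.append(key**(value%k))
--     return math.prod(ans) , math.prod(total)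
-- ===== SOURCE B (Python) =====
-- def simplified(num, k):
--     # Different algorithm: no per-prime exponent bookkeeping at all.
--     # total = num with its largest k-th-power divisor stripped out
--     # ans   = radical(total)**k // total   (smallest x with x*total a k-th power)
--     if num <= 1 or k == 1:
--         # numbers < 2 have no prime factors; every integer is already a 1st power
--         return (1, 1)
--     total = num
--     d = 2
--     while d ** k <= total:
--         p = d ** k
--         while total % p == 0:
--             total //= p
--         d += 1
--     rad = 1
--     t = total
--     d = 2
--     while d * d <= t:
--         if t % d == 0:
--             rad *= d
--             while t % d == 0:
--                 t //= d
--         d += 1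
--     if t > 1:
--         rad *= t
--     return (rad ** k // total, total)
-- ===== Notes on version B (the rewrite author's own statement) =====
-- stated objective: alternative
-- what changed: replaces per-prime exponent counting (dict of exponents, mod-k adjustment per prime) by number-theoretic identities: total is computed by greedily stripping k-th-power divisors d**k from num, and ans as radical(total)**k // total; no exponent of any prime is ever counted or reduced mod k
-- outside the precondition, e.g. on simplified(49, -1): A returns (1, 1), B does not finish within the time limit
import Mathlib
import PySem

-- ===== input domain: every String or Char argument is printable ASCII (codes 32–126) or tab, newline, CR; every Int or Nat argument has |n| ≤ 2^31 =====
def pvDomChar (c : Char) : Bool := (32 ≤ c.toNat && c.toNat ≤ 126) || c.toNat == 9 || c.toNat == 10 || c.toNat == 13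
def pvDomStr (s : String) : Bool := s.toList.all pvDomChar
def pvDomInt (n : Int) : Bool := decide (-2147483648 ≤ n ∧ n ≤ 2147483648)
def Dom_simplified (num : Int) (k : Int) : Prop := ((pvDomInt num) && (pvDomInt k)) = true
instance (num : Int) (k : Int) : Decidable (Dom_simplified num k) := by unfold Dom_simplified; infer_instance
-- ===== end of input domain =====

-- B replaces A's per-prime exponent table and mod-k loop by two number-theoretic
-- identities: total = num with its largest k-th-power divisor stripped (greedy
-- division by d**k), ans = radical(total)**k // total; equal return values on Pre_.

-- ===== PORT A =====
-- temp[key] += 1 on the defaultdict(int)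
def pvBump (temp : PySem.Dict Int Int) (key : Int) : PySem.Dict Int Int :=
  temp.insert key (temp.getD key 0 + 1)

-- inner 'while num % n == 0' loop; fuel num.toNat+1 only makes it total (it always
-- exits by its condition)
def pvAInner (fuel : Nat) (num n : Int) (temp : PySem.Dict Int Int) :
    Int × PySem.Dict Int Int :=
  match fuel with
  | 0 => (num, temp)
  | f + 1 =>
    if PySem.Int.mod num n = 0 then
      pvAInner f (PySem.Int.floordiv num n) n (pvBump temp n)
    else (num, temp)

-- outer 'while n*n <= num' loop
def pvAOuter (fuel : Nat) (num n : Int) (temp : PySem.Dict Int Int) :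
    Int × PySem.Dict Int Int :=
  match fuel with
  | 0 => (num, temp)
  | f + 1 =>
    if n * n ≤ num then
      let p := pvAInner (num.toNat + 1) num n temp
      pvAOuter f p.1 (n + 1) p.2
    else (num, temp)

def simplified (num : Int) (k : Int) : Int × Int :=
  let p := pvAOuter (num.toNat + 1) num 2 PySem.Dict.empty
  let temp := if p.1 > 1 then pvBump p.2 p.1 else p.2
  -- for key,value in temp.items(): append to ans / total
  let lists := temp.items.foldl
    (fun (acc : List Int × List Int) kv =>
      if PySem.Int.mod kv.2 k = 0 then (acc.1 ++ [1], acc.2 ++ [1])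
      else (acc.1 ++ [kv.1 ^ (k - PySem.Int.mod kv.2 k).toNat],
            acc.2 ++ [kv.1 ^ (PySem.Int.mod kv.2 k).toNat]))
    ([1], [1])
  -- math.prod (exponents are nonnegative on Pre_, so Int ^ toNat is exact there)
  (lists.1.foldl (· * ·) 1, lists.2.foldl (· * ·) 1)

-- ===== PORT B =====
-- 'while x % p == 0: x //= p' (used twice in Source B); fuel only makes it total
def pvStripInner (fuel : Nat) (t p : Int) : Int :=
  match fuel with
  | 0 => t
  | f + 1 =>
    if PySem.Int.mod t p = 0 then pvStripInner f (PySem.Int.floordiv t p) p else t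

-- 'while d ** k <= total: …; d += 1' (k ≥ 1 on Pre_, so d ** k = d ^ k.toNat; the
-- '1 < d ^ k.toNat' conjunct is a totality guard only: it is implied by the loop
-- condition whenever k ≥ 1 ∧ d ≥ 2, and merely stops the fuel burn outside Pre_)
def pvStripOuter (fuel : Nat) (total d k : Int) : Int :=
  match fuel with
  | 0 => total
  | f + 1 =>
    if 1 < d ^ k.toNat ∧ d ^ k.toNat ≤ total then
      pvStripOuter f (pvStripInner (total.toNat + 1) total (d ^ k.toNat)) (d + 1) k
    else total

-- 'while d * d <= t: if t % d == 0: rad *= d; …; d += 1'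
def pvRadOuter (fuel : Nat) (rad t d : Int) : Int × Int :=
  match fuel with
  | 0 => (rad, t)
  | f + 1 =>
    if d * d ≤ t then
      if PySem.Int.mod t d = 0 then
        pvRadOuter f (rad * d) (pvStripInner (t.toNat + 1) t d) (d + 1)
      else pvRadOuter f rad t (d + 1)
    else (rad, t)

def simplified_alt (num : Int) (k : Int) : Int × Int :=
  if num ≤ 1 ∨ k = 1 then (1, 1)
  else
    let total := pvStripOuter (num.toNat + 1) num 2 k
    let rt := pvRadOuter (total.toNat + 1) 1 total 2
    let rad := if rt.2 > 1 then rt.1 * rt.2 else rt.1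
    (PySem.Int.floordiv (rad ^ k.toNat) total, total)

-- ===== PRECONDITION & SPEC =====
-- Pre_ excludes k ≤ 0 when num ≥ 2 (num then has a prime factor): there A raises
-- ZeroDivisionError for k = 0 and for k < 0 returns floats, not a pair of ints.
def Pre_simplified (num : Int) (k : Int) : Prop := 1 ≤ k ∨ num ≤ 1
instance (num : Int) (k : Int) : Decidable (Pre_simplified num k) := by
  unfold Pre_simplified; infer_instance
def pvWitness_simplified : Int × Int := (12, 3)

def Spec_simplified (num : Int) (k : Int) (out : Int × Int) : Prop := out = simplified_alt num k
instance (num : Int) (k : Int) (out : Int × Int) : Decidable (Spec_simplified num k out) := by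
  unfold Spec_simplified; infer_instance

-- ===== CLAIM (what is proved, stated in full; the proofs are below) =====
def Claim_equal_simplified : Prop := ∀ (num : Int) (k : Int), Dom_simplified num k → Pre_simplified num k → Spec_simplified num k (simplified num k)

-- ===== LEMMAS AND PROOFS =====

-- ---------- Stage 1: A equals an inline trial-division loop pvC (proof-side only) ----------

def pvAbsorb (p c ans total k : Int) : Int × Int :=
  let r := PySem.Int.mod c k
  if r ≠ 0 then (ans * p ^ (k - r).toNat, total * p ^ r.toNat) else (ans, total)

def pvCInner (fuel : Nat) (num n c : Int) : Int × Int :=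
  match fuel with
  | 0 => (num, c)
  | f + 1 =>
    if PySem.Int.mod num n = 0 then
      pvCInner f (PySem.Int.floordiv num n) n (c + 1)
    else (num, c)

def pvCOuter (fuel : Nat) (num n ans total k : Int) : Int × Int × Int :=
  match fuel with
  | 0 => (num, ans, total)
  | f + 1 =>
    if n * n ≤ num then
      let p := pvCInner (num.toNat + 1) num n 0
      let q := if p.2 ≠ 0 then pvAbsorb n p.2 ans total k else (ans, total)
      pvCOuter f p.1 (n + 1) q.1 q.2 k
    else (num, ans, total)

def pvCRun (num : Int) (k : Int) : Int × Int :=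
  let t := pvCOuter (num.toNat + 1) num 2 1 1 k
  if t.1 > 1 then pvAbsorb t.1 1 t.2.1 t.2.2 k else (t.2.1, t.2.2)

-- the per-item factors A appends (as functions of an items entry)
def pvGAns (k : Int) (kv : Int × Int) : Int :=
  if PySem.Int.mod kv.2 k = 0 then 1 else kv.1 ^ (k - PySem.Int.mod kv.2 k).toNat
def pvGTot (k : Int) (kv : Int × Int) : Int :=
  if PySem.Int.mod kv.2 k = 0 then 1 else kv.1 ^ (PySem.Int.mod kv.2 k).toNat

def pvProdAns (k : Int) (l : List (Int × Int)) : Int := l.foldl (fun a kv => a * pvGAns k kv) 1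
def pvProdTot (k : Int) (l : List (Int × Int)) : Int := l.foldl (fun a kv => a * pvGTot k kv) 1

theorem pvGetD_not_mem (d : PySem.Dict Int Int) {n : Int} (h : n ∉ d.keys) (d0 : Int) :
    d.getD n d0 = d0 := by
  simp [PySem.Dict.getD, (PySem.Dict.get?_eq_none_iff_not_mem_keys d n).2 h]

theorem pvInsert_insert (d : PySem.Dict Int Int) (k v w : Int) :
    (d.insert k v).insert k w = d.insert k w := by
  apply PySem.Dict.ext
  have hc2 : (d.insert k v).contains k = true := by
    simp [PySem.Dict.contains_eq_decide_mem_keys, PySem.Dict.mem_keys_insert]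
  by_cases h : d.contains k
  · rw [PySem.Dict.items_insert_of_contains _ _ hc2,
        PySem.Dict.items_insert_of_contains _ _ h,
        PySem.Dict.items_insert_of_contains _ _ h, List.map_map]
    apply List.map_congr_left
    intro p _
    by_cases hp : p.1 = k <;> simp [Function.comp, hp]
  · have h' : d.contains k = false := by simpa using h
    have hk : k ∉ d.keys := by
      simpa [PySem.Dict.contains_eq_decide_mem_keys] using h'
    rw [PySem.Dict.items_insert_of_contains _ _ hc2,
        PySem.Dict.items_insert_of_not_contains _ _ h',
        PySem.Dict.items_insert_of_not_contains _ _ h', List.map_append]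
    have hmap : d.items.map (fun p => if p.1 == k then (k, w) else p) = d.items := by
      conv_rhs => rw [← List.map_id d.items]
      apply List.map_congr_left
      intro p hp
      have hpk : p.1 ≠ k := fun hpk => hk (hpk ▸ List.mem_map_of_mem hp)
      simp [hpk]
    rw [hmap]
    simp

theorem pvAInner_exits (fuel : Nat) (num n : Int) (temp : PySem.Dict Int Int)
    (hf : num.toNat < fuel) (hnum : 0 < num) (hn : 2 ≤ n) :
    0 < (pvAInner fuel num n temp).1 ∧ (pvAInner fuel num n temp).1 ∣ num ∧
    ¬ n ∣ (pvAInner fuel num n temp).1 := by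
  induction fuel generalizing num temp with
  | zero => exact absurd hf (Nat.not_lt_zero _)
  | succ f ih =>
    by_cases h : PySem.Int.mod num n = 0
    · have hdvd : n ∣ num := (PySem.Int.mod_eq_zero_iff_dvd num n).1 h
      have hfd : PySem.Int.floordiv num n = num / n :=
        PySem.Int.floordiv_eq_ediv_of_pos (by omega)
      have hq : num / n * n = num := Int.ediv_mul_cancel hdvd
      have hqpos : 0 < num / n := by nlinarith
      have hlt : num / n < num := by
        nlinarith [mul_pos hqpos (show (0:Int) < n - 1 by omega)]
      have hdq : num / n ∣ num := ⟨n, hq.symm⟩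
      simp only [pvAInner, if_pos h, hfd]
      obtain ⟨h1, h2, h3⟩ := ih (num / n) (pvBump temp n) (by omega) hqpos
      exact ⟨h1, h2.trans hdq, h3⟩
    · simp only [pvAInner, if_neg h]
      exact ⟨hnum, dvd_refl _, fun hd => h ((PySem.Int.mod_eq_zero_iff_dvd num n).2 hd)⟩

-- A's and C's inner loops run in lockstep; the dict side just accumulates a count on key n
theorem pvInner_corr (fuel : Nat) (num n : Int) (temp : PySem.Dict Int Int) (c : Int) :
    (pvAInner fuel num n temp).1 = (pvCInner fuel num n c).1 ∧
    ((pvCInner fuel num n c).2 = c ∧ (pvAInner fuel num n temp).2 = temp ∨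
     ∃ d : Int, 0 < d ∧ n ∣ num ∧ (pvCInner fuel num n c).2 = c + d ∧
       (pvAInner fuel num n temp).2 = temp.insert n (temp.getD n 0 + d)) := by
  induction fuel generalizing num temp c with
  | zero => exact ⟨rfl, Or.inl ⟨rfl, rfl⟩⟩
  | succ f ih =>
    by_cases h : PySem.Int.mod num n = 0
    · simp only [pvAInner, pvCInner, if_pos h]
      have hdvd : n ∣ num := (PySem.Int.mod_eq_zero_iff_dvd num n).1 h
      obtain ⟨h1, h2⟩ := ih (PySem.Int.floordiv num n) (pvBump temp n) (c + 1)
      refine ⟨h1, Or.inr ?_⟩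
      rcases h2 with ⟨hb, ha⟩ | ⟨d, hd, _, hb, ha⟩
      · exact ⟨1, one_pos, hdvd, by omega, by rw [ha]; rfl⟩
      · refine ⟨d + 1, by omega, hdvd, by omega, ?_⟩
        rw [ha]
        show (temp.insert n (temp.getD n 0 + 1)).insert n
          ((pvBump temp n).getD n 0 + d) = temp.insert n (temp.getD n 0 + (d + 1))
        rw [show (pvBump temp n).getD n 0 = temp.getD n 0 + 1 from
              PySem.Dict.getD_insert_self _ _ _ _,
            pvInsert_insert,
            show temp.getD n 0 + 1 + d = temp.getD n 0 + (d + 1) by ring]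
    · simp only [pvAInner, pvCInner, if_neg h]
      exact ⟨by simp, Or.inl ⟨by simp, by simp⟩⟩

theorem pvAbsorb_append (p c ans total k : Int) :
    pvAbsorb p c ans total k = (ans * pvGAns k (p, c), total * pvGTot k (p, c)) := by
  unfold pvAbsorb pvGAns pvGTot
  by_cases hr : PySem.Int.mod c k = 0 <;> simp [hr]

theorem pvProdAns_append (k : Int) (l : List (Int × Int)) (kv : Int × Int) :
    pvProdAns k (l ++ [kv]) = pvProdAns k l * pvGAns k kv := by
  simp [pvProdAns, List.foldl_append]

theorem pvProdTot_append (k : Int) (l : List (Int × Int)) (kv : Int × Int) :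
    pvProdTot k (l ++ [kv]) = pvProdTot k l * pvGTot k kv := by
  simp [pvProdTot, List.foldl_append]

theorem pvOuter_corr (fuel : Nat) (num n : Int) (temp : PySem.Dict Int Int) (k : Int)
    (hn : 2 ≤ n) (hinv : ∀ m ∈ temp.keys, ¬ m ∣ num) (hnodup : temp.keys.Nodup) :
    (pvAOuter fuel num n temp).1
      = (pvCOuter fuel num n (pvProdAns k temp.items) (pvProdTot k temp.items) k).1 ∧
    (pvCOuter fuel num n (pvProdAns k temp.items) (pvProdTot k temp.items) k).2.1
      = pvProdAns k (pvAOuter fuel num n temp).2.items ∧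
    (pvCOuter fuel num n (pvProdAns k temp.items) (pvProdTot k temp.items) k).2.2
      = pvProdTot k (pvAOuter fuel num n temp).2.items ∧
    (∀ m ∈ (pvAOuter fuel num n temp).2.keys, ¬ m ∣ (pvAOuter fuel num n temp).1) ∧
    (pvAOuter fuel num n temp).2.keys.Nodup := by
  induction fuel generalizing num n temp with
  | zero => exact ⟨rfl, rfl, rfl, hinv, hnodup⟩
  | succ f ih =>
    by_cases hle : n * n ≤ num
    · have hpos : 0 < num := by nlinarith
      simp only [pvAOuter, pvCOuter, if_pos hle]
      obtain ⟨h1, h2⟩ := pvInner_corr (num.toNat + 1) num n temp 0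
      obtain ⟨hApos, hAdvd, hAnd⟩ :=
        pvAInner_exits (num.toNat + 1) num n temp (by omega) hpos hn
      rcases h2 with ⟨hb, ha⟩ | ⟨d, hdpos, hndvd, hb, ha⟩
      · rw [ha, ← h1, hb, if_neg (show ¬((0:Int) ≠ 0) by simp)]
        exact ih (pvAInner (num.toNat + 1) num n temp).1 (n + 1) temp (by omega)
          (fun m hm hd => hinv m hm (hd.trans hAdvd)) hnodup
      · have hfresh : n ∉ temp.keys := fun hm => hinv n hm hndvd
        have hcont : temp.contains n = false := by
          simp [PySem.Dict.contains_eq_decide_mem_keys, hfresh]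
        have hzero : temp.getD n 0 = 0 := pvGetD_not_mem temp hfresh 0
        have ha' : (pvAInner (num.toNat + 1) num n temp).2 = temp.insert n d := by
          rw [ha, hzero, zero_add]
        have hitems : (pvAInner (num.toNat + 1) num n temp).2.items
            = temp.items ++ [(n, d)] := by
          rw [ha']; exact PySem.Dict.items_insert_of_not_contains _ _ hcont
        have hkeys : (pvAInner (num.toNat + 1) num n temp).2.keys
            = temp.keys ++ [n] := by
          rw [ha']
          simp [PySem.Dict.keys, PySem.Dict.items_insert_of_not_contains _ _ hcont]
        have hb' : (pvCInner (num.toNat + 1) num n 0).2 = d := by omega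
        rw [hb', ← h1, if_pos (show d ≠ 0 by omega), pvAbsorb_append]
        have e1 : pvProdAns k temp.items * pvGAns k (n, d)
            = pvProdAns k (pvAInner (num.toNat + 1) num n temp).2.items := by
          rw [hitems, pvProdAns_append]
        have e2 : pvProdTot k temp.items * pvGTot k (n, d)
            = pvProdTot k (pvAInner (num.toNat + 1) num n temp).2.items := by
          rw [hitems, pvProdTot_append]
        have hinv' : ∀ m ∈ (pvAInner (num.toNat + 1) num n temp).2.keys,
            ¬ m ∣ (pvAInner (num.toNat + 1) num n temp).1 := by
          rw [hkeys]
          intro m hm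
          rcases List.mem_append.1 hm with hm | hm
          · exact fun hd => hinv m hm (hd.trans hAdvd)
          · rw [List.mem_singleton.1 hm]; exact hAnd
        have hnodup' : (pvAInner (num.toNat + 1) num n temp).2.keys.Nodup := by
          rw [hkeys]
          simp [List.nodup_append, hnodup]
          exact fun a ha han => hfresh (han ▸ ha)
        simp only [e1, e2]
        exact ih (pvAInner (num.toNat + 1) num n temp).1 (n + 1)
          (pvAInner (num.toNat + 1) num n temp).2 (by omega) hinv' hnodup'
    · simp only [pvAOuter, pvCOuter, if_neg hle]
      exact ⟨by simp, by simp, by simp, hinv, hnodup⟩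

-- A's list-building loop appends exactly the pvGAns/pvGTot factors
theorem pvLists (k : Int) (l : List (Int × Int)) (as bs : List Int) :
    l.foldl (fun (acc : List Int × List Int) kv =>
      if PySem.Int.mod kv.2 k = 0 then (acc.1 ++ [1], acc.2 ++ [1])
      else (acc.1 ++ [kv.1 ^ (k - PySem.Int.mod kv.2 k).toNat],
            acc.2 ++ [kv.1 ^ (PySem.Int.mod kv.2 k).toNat])) (as, bs)
    = (as ++ l.map (pvGAns k), bs ++ l.map (pvGTot k)) := by
  induction l generalizing as bs with
  | nil => simp
  | cons kv t ihl =>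
    by_cases hr : PySem.Int.mod kv.2 k = 0 <;>
      simp [List.foldl_cons, hr, ihl, pvGAns, pvGTot]

theorem pvFoldProd (g : Int × Int → Int) (l : List (Int × Int)) :
    (((1:Int) :: l.map g).foldl (· * ·) 1) = l.foldl (fun a kv => a * g kv) 1 := by
  simp [List.foldl_cons, List.foldl_map]

theorem pvA_eq_C (num k : Int) : simplified num k = pvCRun num k := by
  unfold simplified pvCRun
  obtain ⟨h1, h2, h3, hinv, hnd⟩ :=
    pvOuter_corr (num.toNat + 1) num 2 PySem.Dict.empty k le_rfl
      (by intro m hm; rw [show (PySem.Dict.empty : PySem.Dict Int Int).keys = [] from rfl] at hm; cases hm)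
      (by rw [show (PySem.Dict.empty : PySem.Dict Int Int).keys = [] from rfl]; exact List.nodup_nil)
  rw [show pvProdAns k (PySem.Dict.empty : PySem.Dict Int Int).items = 1 from rfl,
      show pvProdTot k (PySem.Dict.empty : PySem.Dict Int Int).items = 1 from rfl] at h1 h2 h3
  dsimp only
  rw [← h1]
  by_cases hgt : (pvAOuter (num.toNat + 1) num 2 PySem.Dict.empty).1 > 1
  · rw [if_pos hgt]
    have hf2 : (pvAOuter (num.toNat + 1) num 2 PySem.Dict.empty).1
        ∉ (pvAOuter (num.toNat + 1) num 2 PySem.Dict.empty).2.keys :=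
      fun hm => hinv _ hm (dvd_refl _)
    have hc2 : (pvAOuter (num.toNat + 1) num 2 PySem.Dict.empty).2.contains
        (pvAOuter (num.toNat + 1) num 2 PySem.Dict.empty).1 = false := by
      simp [PySem.Dict.contains_eq_decide_mem_keys, hf2]
    have hz : (pvAOuter (num.toNat + 1) num 2 PySem.Dict.empty).2.getD
        (pvAOuter (num.toNat + 1) num 2 PySem.Dict.empty).1 0 = 0 :=
      pvGetD_not_mem _ hf2 0
    have hti : (pvBump (pvAOuter (num.toNat + 1) num 2 PySem.Dict.empty).2
          (pvAOuter (num.toNat + 1) num 2 PySem.Dict.empty).1).items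
        = (pvAOuter (num.toNat + 1) num 2 PySem.Dict.empty).2.items
          ++ [((pvAOuter (num.toNat + 1) num 2 PySem.Dict.empty).1, 1)] := by
      unfold pvBump
      rw [hz, zero_add]
      exact PySem.Dict.items_insert_of_not_contains _ _ hc2
    rw [hti, pvLists, pvAbsorb_append, List.singleton_append, List.singleton_append,
        pvFoldProd, pvFoldProd, h2, h3]
    rw [show ∀ l : List (Int × Int), l.foldl (fun a kv => a * pvGAns k kv) 1 = pvProdAns k l
          from fun l => rfl,
        show ∀ l : List (Int × Int), l.foldl (fun a kv => a * pvGTot k kv) 1 = pvProdTot k l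
          from fun l => rfl,
        pvProdAns_append, pvProdTot_append, if_pos hgt]
  · rw [if_neg hgt, pvLists, List.singleton_append, List.singleton_append,
        pvFoldProd, pvFoldProd, h2, h3, if_neg hgt]
    rfl

-- ---------- Stage 2: the factorization-level values ----------

def pvTN (K M : Nat) : Nat := ∏ p ∈ M.primeFactors, p ^ (M.factorization p % K)
def pvAnsN (K M : Nat) : Nat := ∏ p ∈ M.primeFactors, p ^ ((K - M.factorization p % K) % K)
def pvRadN (M : Nat) : Nat := ∏ p ∈ M.primeFactors, p

-- generic facts about prime products / factorizations

theorem pvSplitProd (F : Nat → Nat → Nat) (M p : Nat) (hp : p ∈ M.primeFactors) :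
    ∏ q ∈ M.primeFactors, F q (M.factorization q)
      = F p (M.factorization p)
        * ∏ q ∈ (M / p ^ M.factorization p).primeFactors,
            F q ((M / p ^ M.factorization p).factorization q) := by
  have hfac : (M / p ^ M.factorization p).factorization = M.factorization.erase p :=
    Nat.factorization_ordCompl M p
  have hpf : (M / p ^ M.factorization p).primeFactors = M.primeFactors.erase p := by
    rw [← Nat.support_factorization, hfac, Finsupp.support_erase, Nat.support_factorization]
  rw [← Finset.mul_prod_erase _ _ hp]
  congr 1
  rw [hpf]
  apply Finset.prod_congr rfl
  intro q hq
  rw [hfac, Finsupp.erase_ne (Finset.mem_erase.1 hq).1]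

theorem pvProdPow_factorization (g : Nat → Nat) (p : Nat) :
    ∀ (s : Finset Nat), (∀ q ∈ s, q.Prime) →
      (∏ q ∈ s, q ^ g q).factorization p = if p ∈ s then g p else 0 := by
  intro s
  induction s using Finset.induction_on with
  | empty => intro _; simp
  | insert a t ha ih =>
    intro hs
    have haP : a.Prime := hs a (Finset.mem_insert_self a t)
    have htP : ∀ q ∈ t, q.Prime := fun q hq => hs q (Finset.mem_insert_of_mem hq)
    have h1 : (a ^ g a) ≠ 0 := pow_ne_zero _ haP.pos.ne'
    have h2 : (∏ q ∈ t, q ^ g q) ≠ 0 :=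
      Finset.prod_ne_zero_iff.2 fun q hq => pow_ne_zero _ ((htP q hq).pos.ne')
    rw [Finset.prod_insert ha, Nat.factorization_mul h1 h2, Finsupp.add_apply, ih htP,
        haP.factorization_pow, Finsupp.single_apply]
    by_cases hpa : a = p
    · subst hpa
      rw [if_pos rfl, if_neg ha, if_pos (Finset.mem_insert_self a t), add_zero]
    · rw [if_neg hpa, zero_add]
      by_cases hpt : p ∈ t
      · rw [if_pos hpt, if_pos (Finset.mem_insert_of_mem hpt)]
      · rw [if_neg hpt, if_neg (by
          rw [Finset.mem_insert]
          rintro (h | h)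
          · exact hpa h.symm
          · exact hpt h)]

theorem pvExitCases (M nN : Nat) (h1 : 1 ≤ M) (hfac : ∀ p, p.Prime → p ∣ M → nN ≤ p)
    (hsq : M < nN * nN) : M = 1 ∨ M.Prime := by
  by_cases hM1 : M = 1
  · exact Or.inl hM1
  · right
    by_contra hnp
    have hp := Nat.minFac_prime hM1
    have hge := hfac _ hp (Nat.minFac_dvd M)
    have hsqle := Nat.minFac_sq_le_self (by omega) hnp
    have h2 : nN * nN ≤ M.minFac * M.minFac := Nat.mul_le_mul hge hge
    rw [pow_two] at hsqle
    omega

theorem pvDivisorPrime (M dN : Nat) (h2 : 2 ≤ dN)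
    (hfac : ∀ p, p.Prime → p ∣ M → dN ≤ p) (hdvd : dN ∣ M) : dN.Prime := by
  have hq := Nat.minFac_prime (show dN ≠ 1 by omega)
  have hge := hfac _ hq ((Nat.minFac_dvd dN).trans hdvd)
  have hle := Nat.minFac_le (show 0 < dN by omega)
  exact Nat.prime_def_minFac.2 ⟨h2, le_antisymm hle hge⟩

theorem pvFactAt (M' nN j : Nat) (hp : nN.Prime) (hnd : ¬ nN ∣ M') (hM' : M' ≠ 0) :
    (M' * nN ^ j).factorization nN = j := by
  rw [Nat.factorization_mul hM' (pow_ne_zero _ hp.pos.ne'), Finsupp.add_apply,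
      Nat.factorization_eq_zero_of_not_dvd hnd, hp.factorization_pow,
      Finsupp.single_apply, if_pos rfl, zero_add]

-- the divide-out inner loops

theorem pvStripInner_spec : ∀ (fuel : Nat) (M p : Nat), 1 ≤ M → 2 ≤ p → M < fuel →
    ∃ M' j : Nat, pvStripInner fuel (M : Int) (p : Int) = (M' : Int) ∧
      M = M' * p ^ j ∧ ¬ p ∣ M' := by
  intro fuel
  induction fuel with
  | zero => intro M p _ _ h3; omega
  | succ f ih =>
    intro M p h1 h2 h3
    by_cases h : p ∣ M
    · have hmod : PySem.Int.mod (M : Int) (p : Int) = 0 :=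
        (PySem.Int.mod_eq_zero_iff_dvd _ _).2 (Int.natCast_dvd_natCast.2 h)
      have hq1 : 1 ≤ M / p := (Nat.one_le_div_iff (by omega)).2 (Nat.le_of_dvd (by omega) h)
      have hlt : M / p < M := Nat.div_lt_self (by omega) (by omega)
      obtain ⟨M', j, e1, e2, e3⟩ := ih (M / p) p hq1 h2 (by omega)
      refine ⟨M', j + 1, ?_, ?_, e3⟩
      · rw [pvStripInner, if_pos hmod, PySem.Int.floordiv_natCast, e1]
      · have : M / p * p = M := Nat.div_mul_cancel h
        rw [pow_succ, ← mul_assoc, ← e2, this]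
    · have hmod : ¬ PySem.Int.mod (M : Int) (p : Int) = 0 := fun hm =>
        h (Int.natCast_dvd_natCast.1 ((PySem.Int.mod_eq_zero_iff_dvd _ _).1 hm))
      exact ⟨M, 0, by rw [pvStripInner, if_neg hmod], by simp, h⟩

theorem pvCInner_spec : ∀ (fuel : Nat) (M p : Nat) (c : Int), 1 ≤ M → 2 ≤ p → M < fuel →
    ∃ M' j : Nat, pvCInner fuel (M : Int) (p : Int) c = ((M' : Int), c + (j : Int)) ∧
      M = M' * p ^ j ∧ ¬ p ∣ M' := by
  intro fuel
  induction fuel with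
  | zero => intro M p c _ _ h3; omega
  | succ f ih =>
    intro M p c h1 h2 h3
    by_cases h : p ∣ M
    · have hmod : PySem.Int.mod (M : Int) (p : Int) = 0 :=
        (PySem.Int.mod_eq_zero_iff_dvd _ _).2 (Int.natCast_dvd_natCast.2 h)
      have hq1 : 1 ≤ M / p := (Nat.one_le_div_iff (by omega)).2 (Nat.le_of_dvd (by omega) h)
      have hlt : M / p < M := Nat.div_lt_self (by omega) (by omega)
      obtain ⟨M', j, e1, e2, e3⟩ := ih (M / p) p (c + 1) hq1 h2 (by omega)
      refine ⟨M', j + 1, ?_, ?_, e3⟩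
      · rw [pvCInner, if_pos hmod, PySem.Int.floordiv_natCast, e1]
        congr 1
        push_cast
        ring
      · have : M / p * p = M := Nat.div_mul_cancel h
        rw [pow_succ, ← mul_assoc, ← e2, this]
    · have hmod : ¬ PySem.Int.mod (M : Int) (p : Int) = 0 := fun hm =>
        h (Int.natCast_dvd_natCast.1 ((PySem.Int.mod_eq_zero_iff_dvd _ _).1 hm))
      exact ⟨M, 0, by rw [pvCInner, if_neg hmod]; simp, by simp, h⟩

-- the absorb step with Nat casts

theorem pvAbsorb_cast (nN j K : Nat) (hK : 1 ≤ K) (ans total : Int) :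
    pvAbsorb (nN : Int) (j : Int) ans total (K : Int)
      = (ans * ((nN ^ ((K - j % K) % K) : Nat) : Int),
         total * ((nN ^ (j % K) : Nat) : Int)) := by
  unfold pvAbsorb
  rw [PySem.Int.mod_natCast]
  by_cases hr : j % K = 0
  · rw [hr]
    simp [Nat.mod_self]
  · have hrlt : j % K < K := Nat.mod_lt _ (by omega)
    rw [if_pos (by exact_mod_cast hr)]
    have ht1 : ((K : Int) - ((j % K : Nat) : Int)).toNat = K - j % K := by omega
    have ht2 : (((j % K : Nat) : Int)).toNat = j % K := Int.toNat_natCast _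
    rw [ht1, ht2]
    have : (K - j % K) % K = K - j % K := Nat.mod_eq_of_lt (by omega)
    rw [this]
    push_cast
    rfl

-- the finishing step of pvCRun

def pvCFin (t : Int × Int × Int) (k : Int) : Int × Int :=
  if t.1 > 1 then pvAbsorb t.1 1 t.2.1 t.2.2 k else (t.2.1, t.2.2)

theorem pvCFin_exit (M K : Nat) (hK : 1 ≤ K) (hMp : M = 1 ∨ M.Prime) (ans total : Int) :
    pvCFin ((M : Int), ans, total) (K : Int)
      = (ans * ((pvAnsN K M : Nat) : Int), total * ((pvTN K M : Nat) : Int)) := by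
  rcases hMp with h1 | hp
  · subst h1
    unfold pvCFin
    rw [if_neg (by norm_num)]
    unfold pvAnsN pvTN
    simp
  · unfold pvCFin
    dsimp only
    rw [if_pos (show (1:Int) < (M:Int) by exact_mod_cast hp.one_lt)]
    rw [show (1 : Int) = ((1 : Nat) : Int) from rfl, pvAbsorb_cast M 1 K hK]
    unfold pvAnsN pvTN
    rw [hp.primeFactors, Finset.prod_singleton, Finset.prod_singleton,
        hp.factorization_self]

theorem pvCOuter_spec : ∀ (fuel : Nat) (M nN K : Nat) (ans total : Int),
    1 ≤ K → 1 ≤ M → 2 ≤ nN → (∀ p, p.Prime → p ∣ M → nN ≤ p) → M + 2 ≤ nN + fuel →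
    pvCFin (pvCOuter fuel (M : Int) (nN : Int) ans total (K : Int)) (K : Int)
      = (ans * ((pvAnsN K M : Nat) : Int), total * ((pvTN K M : Nat) : Int)) := by
  intro fuel
  induction fuel with
  | zero =>
    intro M nN K ans total hK hM hn hfac hfuel
    exact pvCFin_exit M K hK (pvExitCases M nN hM hfac (by nlinarith)) ans total
  | succ f ih =>
    intro M nN K ans total hK hM hn hfac hfuel
    by_cases hle : nN * nN ≤ M
    · rw [pvCOuter, if_pos (by exact_mod_cast hle)]
      simp only [Int.toNat_natCast]
      obtain ⟨M', j, heq, hMeq, hnd⟩ := pvCInner_spec (M + 1) M nN 0 hM hn (by omega)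
      rw [heq]
      simp only [zero_add]
      have hM'pos : 1 ≤ M' := by
        rcases Nat.eq_zero_or_pos M' with h | h
        · subst h; simp at hMeq; omega
        · exact h
      by_cases hj : j = 0
      · subst hj
        simp only [pow_zero, mul_one] at hMeq
        rw [if_neg (by norm_num)]
        have hc1 : ((nN : Int) + 1) = ((nN + 1 : Nat) : Int) := by push_cast; ring
        rw [hc1, hMeq]
        exact ih M' (nN + 1) K ans total hK hM'pos (by omega)
          (fun p hp hd => by
            have h1 := hfac p hp (hMeq ▸ hd)
            have h2 : p ≠ nN := fun he => hnd (he ▸ hd)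
            omega)
          (by omega)
      · have hdvd : nN ∣ M := by
          rw [hMeq]
          exact Dvd.dvd.mul_left (dvd_pow_self nN hj) M'
        have hprime : nN.Prime := pvDivisorPrime M nN hn hfac hdvd
        rw [if_pos (by exact_mod_cast hj)]
        rw [pvAbsorb_cast nN j K hK]
        have hM0 : M ≠ 0 := by omega
        have hfactAt : M.factorization nN = j := by
          rw [hMeq]; exact pvFactAt M' nN j hprime hnd (by omega)
        have hcompl : M / nN ^ j = M' := by
          conv_lhs => rw [hMeq]
          exact Nat.mul_div_cancel _ (pow_pos hprime.pos _)
        have hmem : nN ∈ M.primeFactors := Nat.mem_primeFactors.2 ⟨hprime, hdvd, hM0⟩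
        have hsplitA : pvAnsN K M = nN ^ ((K - j % K) % K) * pvAnsN K M' := by
          unfold pvAnsN
          rw [pvSplitProd (fun q e => q ^ ((K - e % K) % K)) M nN hmem, hfactAt, hcompl]
        have hsplitT : pvTN K M = nN ^ (j % K) * pvTN K M' := by
          unfold pvTN
          rw [pvSplitProd (fun q e => q ^ (e % K)) M nN hmem, hfactAt, hcompl]
        have hfac' : ∀ p, p.Prime → p ∣ M' → nN + 1 ≤ p := by
          intro p hp hd
          have h1 := hfac p hp (hd.trans ⟨nN ^ j, hMeq⟩)
          have h2 : p ≠ nN := fun h => hnd (h ▸ hd)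
          omega
        have hM'le : M' ≤ M := Nat.le_of_dvd (by omega) ⟨nN ^ j, hMeq⟩
        have : ((nN : Int) + 1) = ((nN + 1 : Nat) : Int) := by push_cast; ring
        rw [this, ih M' (nN + 1) K _ _ hK hM'pos (by omega) hfac' (by omega),
            hsplitA, hsplitT]
        push_cast
        rw [mul_assoc, mul_assoc]
    · rw [pvCOuter, if_neg (by exact_mod_cast hle)]
      exact pvCFin_exit M K hK (pvExitCases M nN hM hfac (by omega)) ans total

theorem pvSub_C (num k : Int) (hnum : 2 ≤ num) (hk : 1 ≤ k) :
    pvCRun num k = ((pvAnsN k.toNat num.toNat : Int), (pvTN k.toNat num.toNat : Int)) := by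
  have hnum' : num = ((num.toNat : Nat) : Int) := (Int.toNat_of_nonneg (by omega)).symm
  have hk' : k = ((k.toNat : Nat) : Int) := (Int.toNat_of_nonneg (by omega)).symm
  have hrun : pvCRun num k
      = pvCFin (pvCOuter (num.toNat + 1) num 2 1 1 k) k := rfl
  rw [hrun]
  conv_lhs => rw [hnum', hk', show (2 : Int) = ((2 : Nat) : Int) from rfl]
  simp only [Int.toNat_natCast]
  rw [pvCOuter_spec (num.toNat + 1) num.toNat 2 k.toNat 1 1 (by omega) (by omega) le_rfl
      (fun p hp _ => hp.two_le) (by omega)]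
  rw [one_mul, one_mul]

-- B side: the k-th-power stripping loop

theorem pvStripOuter_spec : ∀ (fuel : Nat) (M dN K : Nat),
    2 ≤ K → 1 ≤ M → 2 ≤ dN → (∀ c, 2 ≤ c → c < dN → ¬ c ^ K ∣ M) → M + 2 ≤ dN + fuel →
    ∃ R s : Nat, pvStripOuter fuel (M : Int) (dN : Int) (K : Int) = (R : Int) ∧
      s ^ K * R = M ∧ ∀ c, 2 ≤ c → ¬ c ^ K ∣ R := by
  intro fuel
  induction fuel with
  | zero =>
    intro M dN K hK hM hd hinv hfuel
    refine ⟨M, 1, rfl, by rw [one_pow, one_mul], fun c hc hdvd => ?_⟩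
    by_cases hlt : c < dN
    · exact hinv c hc hlt hdvd
    · have h1 : c ≤ c ^ K := Nat.le_self_pow (by omega) c
      have h2 : c ^ K ≤ M := Nat.le_of_dvd (by omega) hdvd
      omega
  | succ f ih =>
    intro M dN K hK hM hd hinv hfuel
    rw [pvStripOuter]
    simp only [Int.toNat_natCast]
    have h1lt : (1 : Int) < (dN : Int) ^ K := by
      have : 2 ≤ dN ^ K := le_trans hd (Nat.le_self_pow (by omega) dN)
      exact_mod_cast (by omega : 1 < dN ^ K)
    by_cases hle : dN ^ K ≤ M
    · rw [if_pos ⟨h1lt, by exact_mod_cast hle⟩]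
      have hp2 : 2 ≤ dN ^ K := le_trans hd (Nat.le_self_pow (by omega) dN)
      have hcast : ((dN : Int)) ^ K = ((dN ^ K : Nat) : Int) := by push_cast; rfl
      rw [hcast]
      obtain ⟨M1, j, e1, e2, e3⟩ := pvStripInner_spec (M + 1) M (dN ^ K) hM hp2 (by omega)
      rw [e1]
      have hM1pos : 1 ≤ M1 := by
        rcases Nat.eq_zero_or_pos M1 with h | h
        · subst h; simp at e2; omega
        · exact h
      have hM1le : M1 ≤ M := Nat.le_of_dvd (by omega) ⟨(dN ^ K) ^ j, e2⟩
      have hc1 : ((dN : Int) + 1) = ((dN + 1 : Nat) : Int) := by push_cast; ring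
      rw [hc1]
      obtain ⟨R, s1, f1, f2, f3⟩ := ih M1 (dN + 1) K hK hM1pos (by omega)
        (fun c hc hlt hdvd => by
          by_cases hcd : c < dN
          · exact hinv c hc hcd (hdvd.trans ⟨(dN ^ K) ^ j, e2⟩)
          · have hceq : c = dN := by omega
            exact e3 (hceq ▸ hdvd))
        (by omega)
      refine ⟨R, dN ^ j * s1, f1, ?_, f3⟩
      rw [mul_pow, ← pow_mul, mul_assoc, f2, e2, pow_mul]
      ring
    · rw [if_neg (fun hand => hle (by exact_mod_cast hand.2))]
      refine ⟨M, 1, rfl, by rw [one_pow, one_mul], fun c hc hdvd => ?_⟩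
      by_cases hlt : c < dN
      · exact hinv c hc hlt hdvd
      · have h2 : c ^ K ≤ M := Nat.le_of_dvd (by omega) hdvd
        have h3 : dN ^ K ≤ c ^ K := Nat.pow_le_pow_left (by omega) K
        omega

-- factorization characterisations

theorem pvTN_factorization (K M p : Nat) (_hM : M ≠ 0) (hp : p.Prime) :
    (pvTN K M).factorization p = M.factorization p % K := by
  unfold pvTN
  rw [pvProdPow_factorization (fun q => M.factorization q % K) p M.primeFactors
      (fun q hq => Nat.prime_of_mem_primeFactors hq)]
  by_cases hmem : p ∈ M.primeFactors
  · rw [if_pos hmem]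
  · rw [if_neg hmem]
    have h0 : M.factorization p = 0 := by
      rw [← Nat.support_factorization] at hmem
      exact Finsupp.notMem_support_iff.1 hmem
    rw [h0, Nat.zero_mod]

theorem pvTN_ne_zero (K M : Nat) : pvTN K M ≠ 0 := by
  unfold pvTN
  exact Finset.prod_ne_zero_iff.2
    (fun q hq => pow_ne_zero _ (Nat.prime_of_mem_primeFactors hq).pos.ne')

theorem pvStripChar (K M R s : Nat) (hK : 1 ≤ K) (hM : 1 ≤ M)
    (hs : s ^ K * R = M) (hc : ∀ c, 2 ≤ c → ¬ c ^ K ∣ R) : R = pvTN K M := by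
  have hR0 : R ≠ 0 := by
    intro h; rw [h, mul_zero] at hs; omega
  have hs0 : s ≠ 0 := by
    intro h
    rw [h, Nat.zero_pow (show 0 < K by omega), zero_mul] at hs
    omega
  apply Nat.eq_of_factorization_eq hR0 (pvTN_ne_zero K M)
  intro p
  by_cases hp : p.Prime
  · rw [pvTN_factorization K M p (by omega) hp]
    have hfM : M.factorization p = K * s.factorization p + R.factorization p := by
      rw [← hs, Nat.factorization_mul (pow_ne_zero _ hs0) hR0, Finsupp.add_apply,
          Nat.factorization_pow, Finsupp.smul_apply, smul_eq_mul]
    have hlt : R.factorization p < K := by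
      by_contra hge
      exact hc p hp.two_le
        ((Nat.Prime.pow_dvd_iff_le_factorization hp hR0).2 (by omega))
    rw [hfM, Nat.mul_add_mod, Nat.mod_eq_of_lt hlt]
  · rw [Nat.factorization_eq_zero_of_not_prime _ hp,
        Nat.factorization_eq_zero_of_not_prime _ hp]

-- the radical loop

def pvRadFin (t : Int × Int) : Int := if t.2 > 1 then t.1 * t.2 else t.1

theorem pvRadFin_exit (M : Nat) (hMp : M = 1 ∨ M.Prime) (rad : Int) :
    pvRadFin (rad, (M : Int)) = rad * ((pvRadN M : Nat) : Int) := by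
  rcases hMp with h1 | hp
  · subst h1
    unfold pvRadFin pvRadN
    rw [if_neg (by norm_num)]
    simp
  · unfold pvRadFin pvRadN
    dsimp only
    rw [if_pos (show (1:Int) < (M:Int) by exact_mod_cast hp.one_lt),
        hp.primeFactors, Finset.prod_singleton]

theorem pvRadOuter_spec : ∀ (fuel : Nat) (M dN : Nat) (rad : Int),
    1 ≤ M → 2 ≤ dN → (∀ p, p.Prime → p ∣ M → dN ≤ p) → M + 2 ≤ dN + fuel →
    pvRadFin (pvRadOuter fuel rad (M : Int) (dN : Int)) = rad * ((pvRadN M : Nat) : Int) := by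
  intro fuel
  induction fuel with
  | zero =>
    intro M dN rad hM hd hfac hfuel
    exact pvRadFin_exit M (pvExitCases M dN hM hfac (by nlinarith)) rad
  | succ f ih =>
    intro M dN rad hM hd hfac hfuel
    rw [pvRadOuter]
    by_cases hle : dN * dN ≤ M
    · rw [if_pos (by exact_mod_cast hle)]
      by_cases hdvd : dN ∣ M
      · rw [if_pos ((PySem.Int.mod_eq_zero_iff_dvd _ _).2 (Int.natCast_dvd_natCast.2 hdvd))]
        simp only [Int.toNat_natCast]
        have hprime : dN.Prime := pvDivisorPrime M dN hd hfac hdvd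
        obtain ⟨M', j, e1, e2, e3⟩ := pvStripInner_spec (M + 1) M dN hM hd (by omega)
        rw [e1]
        have hj : j ≠ 0 := by
          intro h; rw [h, pow_zero, mul_one] at e2; exact e3 (e2 ▸ hdvd)
        have hM'pos : 1 ≤ M' := by
          rcases Nat.eq_zero_or_pos M' with h | h
          · subst h; simp at e2; omega
          · exact h
        have hM0 : M ≠ 0 := by omega
        have hfactAt : M.factorization dN = j := by
          rw [e2]; exact pvFactAt M' dN j hprime e3 (by omega)
        have hcompl : M / dN ^ j = M' := by
          conv_lhs => rw [e2]
          exact Nat.mul_div_cancel _ (pow_pos hprime.pos _)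
        have hmem : dN ∈ M.primeFactors := Nat.mem_primeFactors.2 ⟨hprime, hdvd, hM0⟩
        have hsplit : pvRadN M = dN * pvRadN M' := by
          unfold pvRadN
          rw [pvSplitProd (fun q _ => q) M dN hmem, hfactAt, hcompl]
        have hfac' : ∀ p, p.Prime → p ∣ M' → dN + 1 ≤ p := by
          intro p hp hdp
          have h1 := hfac p hp (hdp.trans ⟨dN ^ j, e2⟩)
          have h2 : p ≠ dN := fun he => e3 (he ▸ hdp)
          omega
        have hM'le : M' ≤ M := Nat.le_of_dvd (by omega) ⟨dN ^ j, e2⟩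
        have hc1 : ((dN : Int) + 1) = ((dN + 1 : Nat) : Int) := by push_cast; ring
        rw [hc1, ih M' (dN + 1) (rad * (dN : Int)) hM'pos (by omega) hfac' (by omega),
            hsplit]
        push_cast
        ring
      · rw [if_neg (fun hm => hdvd
          (Int.natCast_dvd_natCast.1 ((PySem.Int.mod_eq_zero_iff_dvd _ _).1 hm)))]
        have hfac' : ∀ p, p.Prime → p ∣ M → dN + 1 ≤ p := by
          intro p hp hdp
          have h1 := hfac p hp hdp
          have h2 : p ≠ dN := fun he => hdvd (he ▸ hdp)
          omega
        have hc1 : ((dN : Int) + 1) = ((dN + 1 : Nat) : Int) := by push_cast; ring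
        rw [hc1]
        exact ih M (dN + 1) rad hM (by omega) hfac' (by omega)
    · rw [if_neg (by exact_mod_cast hle)]
      exact pvRadFin_exit M (pvExitCases M dN hM hfac (by omega)) rad

-- the closing identity  T * Ans = radical(T)^K

theorem pvTN_primeFactors (K M : Nat) (_hK : 1 ≤ K) (hM : M ≠ 0) :
    (pvTN K M).primeFactors
      = M.primeFactors.filter (fun p => M.factorization p % K ≠ 0) := by
  ext p
  by_cases hp : p.Prime
  · rw [← Nat.support_factorization, Finsupp.mem_support_iff,
        pvTN_factorization K M p hM hp, Finset.mem_filter,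
        ← Nat.support_factorization, Finsupp.mem_support_iff]
    constructor
    · intro h
      refine ⟨fun h0 => ?_, h⟩
      rw [h0, Nat.zero_mod] at h
      exact h rfl
    · exact fun h => h.2
  · constructor
    · intro h
      exact absurd (Nat.prime_of_mem_primeFactors h) hp
    · intro h
      exact absurd (Nat.prime_of_mem_primeFactors (Finset.mem_filter.1 h).1) hp

theorem pvMulAns (K M : Nat) (hK : 1 ≤ K) (hM : M ≠ 0) :
    pvTN K M * pvAnsN K M = pvRadN (pvTN K M) ^ K := by
  have h1 : pvTN K M
      = ∏ p ∈ M.primeFactors.filter (fun p => M.factorization p % K ≠ 0),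
          p ^ (M.factorization p % K) := by
    unfold pvTN
    rw [Finset.prod_filter_of_ne]
    intro x _ hx
    intro h0
    rw [h0, pow_zero] at hx
    exact hx rfl
  have h2 : pvAnsN K M
      = ∏ p ∈ M.primeFactors.filter (fun p => M.factorization p % K ≠ 0),
          p ^ ((K - M.factorization p % K) % K) := by
    unfold pvAnsN
    rw [Finset.prod_filter_of_ne]
    intro x _ hx
    intro h0
    rw [h0, Nat.sub_zero, Nat.mod_self, pow_zero] at hx
    exact hx rfl
  have h3 : pvRadN (pvTN K M)
      = ∏ p ∈ M.primeFactors.filter (fun p => M.factorization p % K ≠ 0), p := by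
    unfold pvRadN
    rw [pvTN_primeFactors K M hK hM]
  rw [h3, h1, h2, ← Finset.prod_pow, ← Finset.prod_mul_distrib]
  apply Finset.prod_congr rfl
  intro p hp
  have hne : M.factorization p % K ≠ 0 := (Finset.mem_filter.1 hp).2
  have hlt : M.factorization p % K < K := Nat.mod_lt _ (by omega)
  rw [← pow_add]
  congr 1
  rw [Nat.mod_eq_of_lt (by omega : K - M.factorization p % K < K)]
  omega

theorem pvSub_B (num k : Int) (hnum : 2 ≤ num) (hk : 2 ≤ k) :
    simplified_alt num k = ((pvAnsN k.toNat num.toNat : Int), (pvTN k.toNat num.toNat : Int)) := by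
  have hnum' : num = ((num.toNat : Nat) : Int) := (Int.toNat_of_nonneg (by omega)).symm
  have hk' : k = ((k.toNat : Nat) : Int) := (Int.toNat_of_nonneg (by omega)).symm
  have hN2 : 2 ≤ num.toNat := by omega
  have hK2 : 2 ≤ k.toNat := by omega
  unfold simplified_alt
  rw [if_neg (by rw [not_or]; exact ⟨by omega, by omega⟩)]
  conv_lhs => rw [hnum', hk', show (2 : Int) = ((2 : Nat) : Int) from rfl]
  simp only [Int.toNat_natCast]
  obtain ⟨R, s, hR, hsR, hcR⟩ := pvStripOuter_spec (num.toNat + 1) num.toNat 2 k.toNat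
    hK2 (by omega) le_rfl (fun c hc hlt _ => by omega) (by omega)
  rw [hR]
  have hRT : R = pvTN k.toNat num.toNat :=
    pvStripChar k.toNat num.toNat R s (by omega) (by omega) hsR hcR
  have hRpos : 1 ≤ R := by
    rcases Nat.eq_zero_or_pos R with h | h
    · rw [h, mul_zero] at hsR; omega
    · exact h
  simp only [Int.toNat_natCast]
  have hrad := pvRadOuter_spec (R + 1) R 2 1 (by omega) le_rfl
    (fun p hp _ => hp.two_le) (by omega)
  have hfin : (if (pvRadOuter (R + 1) 1 (R : Int) ((2:Nat) : Int)).2 > 1 then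
        (pvRadOuter (R + 1) 1 (R : Int) ((2:Nat) : Int)).1
          * (pvRadOuter (R + 1) 1 (R : Int) ((2:Nat) : Int)).2
      else (pvRadOuter (R + 1) 1 (R : Int) ((2:Nat) : Int)).1)
      = 1 * ((pvRadN R : Nat) : Int) := hrad
  rw [hfin, one_mul]
  have hpow : ((pvRadN R : Nat) : Int) ^ k.toNat = (((pvRadN R ^ k.toNat : Nat)) : Int) := by
    push_cast; rfl
  rw [hpow]
  have hmul : pvRadN R ^ k.toNat = R * pvAnsN k.toNat num.toNat := by
    conv_lhs => rw [hRT]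
    rw [← pvMulAns k.toNat num.toNat (by omega) (by omega), hRT]
  rw [hmul, PySem.Int.floordiv_natCast,
      Nat.mul_div_cancel_left _ (by omega : 0 < R), hRT]

-- ===== VERDICT (by name: the statement is the Claim_ definition above) =====
theorem simplified_spec : Claim_equal_simplified := by
  unfold Claim_equal_simplified
  intro num k _ hpre
  unfold Spec_simplified
  rw [pvA_eq_C]
  by_cases hnum : num ≤ 1
  · -- both sides are (1,1)
    have hc : pvCRun num k = (1, 1) := by
      unfold pvCRun pvCOuter
      rw [if_neg (by omega : ¬ (2 * 2 ≤ num))]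
      simp only
      rw [if_neg (by omega : ¬ num > 1)]
    rw [hc]
    unfold simplified_alt
    rw [if_pos (Or.inl hnum)]
  · have h2 : 2 ≤ num := by omega
    have hk : 1 ≤ k := by rcases hpre with h | h; exact h; omega
    by_cases hk1 : k = 1
    · subst hk1
      rw [pvSub_C num 1 h2 le_rfl]
      unfold simplified_alt
      rw [if_pos (Or.inr rfl)]
      have ht : pvTN 1 num.toNat = 1 := by
        unfold pvTN; simp [Nat.mod_one]
      have ha : pvAnsN 1 num.toNat = 1 := by
        unfold pvAnsN; simp [Nat.mod_one]
      rw [show Int.toNat 1 = 1 from rfl, ht, ha]; rfl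
    · rw [pvSub_C num k h2 hk, pvSub_B num k h2 (by omega)]
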